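-- pv_equiv track=rewrite | github.com/chmcbs/RuneSync | runesync.py | proper_title
-- ===== SOURCE A (Python) =====
-- def proper_title(text):
--     """Custom title function that doesn't capitalize letters after apostrophes"""
--     words = text.split()
--     result = []
--     for word in words:
--         if "'" in word:
--             # Split on apostrophe and handle each part
--             parts = word.split("'")
--             titled_parts = [parts[0].capitalize()]  # Capitalize first part
--             for part in parts[1:]:
--                 titled_parts.append(part.lower())  # Keep rest lowercase
--             result.append("'".join(titled_parts))
--         else:
--             result.append(word.capitalize())
--     return " ".join(result)
-- ===== SOURCE B (Python) =====
-- def proper_title(text):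
--     """Custom title function that doesn't capitalize letters after apostrophes"""
--     # str.capitalize() already lowercases everything after the first character,
--     # so the apostrophe-splitting branch of the original is a no-op.
--     return " ".join(word.capitalize() for word in text.split())
-- ===== Notes on version B (the rewrite author's own statement) =====
-- stated objective: simpler
-- what changed: Dropped the apostrophe branch and its inner split/lower/join loop entirely: str.capitalize() already lowercases everything after the first character, so B is a single map over the words.
import Mathlib
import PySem

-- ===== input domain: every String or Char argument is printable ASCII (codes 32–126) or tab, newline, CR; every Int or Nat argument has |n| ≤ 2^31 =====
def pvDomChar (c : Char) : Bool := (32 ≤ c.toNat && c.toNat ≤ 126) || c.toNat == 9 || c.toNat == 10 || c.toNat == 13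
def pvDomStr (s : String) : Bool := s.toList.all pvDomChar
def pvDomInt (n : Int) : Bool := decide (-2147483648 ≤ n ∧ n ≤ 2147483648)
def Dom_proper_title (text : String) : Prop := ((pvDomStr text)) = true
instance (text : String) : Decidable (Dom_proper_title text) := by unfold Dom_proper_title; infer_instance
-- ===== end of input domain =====

-- B drops A's apostrophe branch and its inner split/lower/join loop (a no-op, since
-- str.capitalize() already lowercases everything after the first character): simpler, same cost.

-- port of str.capitalize (exact on the ASCII domain: titlecase = uppercase there)
def pyCapitalizeChars : List Char → List Char
  | [] => []
  | c :: t => PySem.Chars.upperChar c :: PySem.Chars.lower t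

def pyCapitalize (s : String) : String := String.ofList (pyCapitalizeChars s.toList)

-- ===== PORT A =====
def proper_title (text : String) : String :=
  let words := PySem.Str.split₀ text
  let result := words.foldl (fun result word =>
    if PySem.Str.isIn "'" word then
      -- parts = word.split("'"); sep ≠ "" so Chars.splitOn is exact
      let parts := (PySem.Chars.splitOn word.toList "'".toList).map String.ofList
      -- parts[0]: str.split always returns a nonempty list, so headD never takes the default
      let titled_parts := [pyCapitalize (parts.headD "")]
      let titled_parts := (PySem.List.slice parts (some 1) none).foldl
        (fun tp part => tp ++ [PySem.Str.lower part]) titled_parts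
      result ++ [PySem.Str.join "'" titled_parts]
    else
      result ++ [pyCapitalize word]) []
  PySem.Str.join " " result

-- ===== PORT B =====
def proper_title_alt (text : String) : String :=
  PySem.Str.join " " ((PySem.Str.split₀ text).map pyCapitalize)

-- ===== PRECONDITION & SPEC =====
def Spec_proper_title (text : String) (out : String) : Prop := out = proper_title_alt text
instance (text : String) (out : String) : Decidable (Spec_proper_title text out) := by unfold Spec_proper_title; infer_instance

-- ===== CLAIM (what is proved, stated in full; the proofs are below) =====
def Claim_equal_proper_title : Prop := ∀ (text : String), Dom_proper_title text → Spec_proper_title text (proper_title text)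

-- ===== LEMMAS AND PROOFS =====

-- a simple structural model of cs.split("'")
def splitAp : List Char → List (List Char)
  | [] => [[]]
  | c :: rest =>
    if c = '\'' then [] :: splitAp rest
    else match splitAp rest with
      | [] => [[c]]
      | p :: t => (c :: p) :: t

def consAll (pre : List Char) : List (List Char) → List (List Char)
  | [] => [pre]
  | p :: t => (pre ++ p) :: t

theorem splitAp_ne_nil (l : List Char) : splitAp l ≠ [] := by
  cases l with
  | nil => simp [splitAp]
  | cons c rest =>
    simp only [splitAp]
    split
    · simp
    · split <;> simp

theorem go_spec (fuel : Nat) : ∀ (l cur : List Char) (acc : List (List Char)),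
    l.length ≤ fuel →
    PySem.Chars.splitOn.go ['\''] fuel l cur acc = acc.reverse ++ consAll cur.reverse (splitAp l) := by
  induction fuel with
  | zero =>
    intro l cur acc h
    have : l = [] := by
      cases l with
      | nil => rfl
      | cons a b => simp at h
    subst this
    simp [PySem.Chars.splitOn.go, splitAp, consAll]
  | succ fuel ih =>
    intro l cur acc h
    cases l with
    | nil => simp [PySem.Chars.splitOn.go, splitAp, consAll]
    | cons c rest =>
      rw [PySem.Chars.splitOn.go]
      by_cases hc : c = '\''
      · subst hc
        have hpre : ['\''].isPrefixOf ('\'' :: rest) = true := by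
          simp [List.isPrefixOf]
        rw [if_pos hpre]
        simp only [List.length_cons] at h
        rw [ih _ _ _ (by simpa using Nat.le_of_succ_le_succ h)]
        simp [splitAp, consAll]
        cases hs : splitAp rest with
        | nil => exact absurd hs (splitAp_ne_nil rest)
        | cons p t => simp
      · have hpre : ['\''].isPrefixOf (c :: rest) = false := by
          simp [List.isPrefixOf]
          intro h'; exact absurd h'.symm hc
        rw [if_neg (by simp [hpre])]
        simp only [List.length_cons] at h
        rw [ih _ _ _ (Nat.le_of_succ_le_succ h)]
        simp only [splitAp, if_neg hc]
        cases hs : splitAp rest with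
        | nil => exact absurd hs (splitAp_ne_nil rest)
        | cons p t => simp [consAll]

theorem splitOn_eq_splitAp (l : List Char) : PySem.Chars.splitOn l ['\''] = splitAp l := by
  have := go_spec (l.length + 1) l [] [] (by omega)
  rw [PySem.Chars.splitOn] at *
  rw [this]
  cases hs : splitAp l with
  | nil => exact absurd hs (splitAp_ne_nil l)
  | cons p t => simp [consAll]

theorem lowerChar_ap : PySem.Chars.lowerChar '\'' = '\'' := by decide
theorem upperChar_ap : PySem.Chars.upperChar '\'' = '\'' := by decide

theorem lower_cons (c : Char) (t : List Char) :
    PySem.Chars.lower (c :: t) = PySem.Chars.lowerChar c :: PySem.Chars.lower t := by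
  simp [PySem.Chars.lower]

theorem lower_nil : PySem.Chars.lower [] = [] := by simp [PySem.Chars.lower]

theorem join_cons_head (c : Char) (p : List Char) (t : List (List Char)) :
    PySem.Chars.join ['\''] ((c :: p) :: t) = c :: PySem.Chars.join ['\''] (p :: t) := by
  cases t with
  | nil => rw [PySem.Chars.join_singleton, PySem.Chars.join_singleton]
  | cons q u => rw [PySem.Chars.join_cons_cons, PySem.Chars.join_cons_cons]; simp

-- "'".join(map lower (split on "'")) = lower l
theorem join_map_lower (l : List Char) :
    PySem.Chars.join ['\''] ((splitAp l).map PySem.Chars.lower) = PySem.Chars.lower l := by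
  induction l with
  | nil => simp [splitAp, PySem.Chars.join_singleton, lower_nil]
  | cons c rest ih =>
    simp only [splitAp]
    cases hs : splitAp rest with
    | nil => exact absurd hs (splitAp_ne_nil rest)
    | cons p t =>
      rw [hs, List.map_cons] at ih
      by_cases hc : c = '\''
      · subst hc
        rw [if_pos rfl, List.map_cons, lower_nil, List.map_cons,
          PySem.Chars.join_cons_cons, lower_cons, lowerChar_ap]
        simp only [List.nil_append, List.singleton_append]
        rw [ih]
      · rw [if_neg hc, List.map_cons, lower_cons, lower_cons, join_cons_head, ih]

-- the whole apostrophe branch of A, on chars, equals capitalize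
theorem branch_eq_capitalize (l : List Char) :
    PySem.Chars.join ['\'']
      (pyCapitalizeChars ((splitAp l).headD []) :: ((splitAp l).drop 1).map PySem.Chars.lower)
    = pyCapitalizeChars l := by
  cases l with
  | nil => simp [splitAp, pyCapitalizeChars, PySem.Chars.join_singleton]
  | cons c rest =>
    simp only [splitAp]
    cases hs : splitAp rest with
    | nil => exact absurd hs (splitAp_ne_nil rest)
    | cons p t =>
      have hjml := join_map_lower rest
      rw [hs, List.map_cons] at hjml
      by_cases hc : c = '\''
      · subst hc
        rw [if_pos rfl]
        simp only [List.headD_cons, List.drop_succ_cons, List.drop_zero, pyCapitalizeChars,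
          List.map_cons, PySem.Chars.join_cons_cons, List.nil_append, List.singleton_append]
        rw [hjml, upperChar_ap]
      · rw [if_neg hc]
        simp only [List.headD_cons, List.drop_succ_cons, List.drop_zero, pyCapitalizeChars]
        rw [join_cons_head, hjml]

-- accumulator loop = map
theorem foldl_push {α β : Type} (f : α → β) (l : List α) (init : List β) :
    l.foldl (fun r w => r ++ [f w]) init = init ++ l.map f := by
  induction l generalizing init with
  | nil => simp
  | cons a t ih => simp [List.foldl_cons, ih]

-- A's per-word apostrophe branch, string level
theorem branch_str (word : String) :
    PySem.Str.join "'"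
      ((PySem.List.slice ((PySem.Chars.splitOn word.toList "'".toList).map String.ofList) (some 1) none).foldl
        (fun tp part => tp ++ [PySem.Str.lower part])
        [pyCapitalize (((PySem.Chars.splitOn word.toList "'".toList).map String.ofList).headD "")])
    = pyCapitalize word := by
  rw [PySem.List.slice_from _ (by norm_num : (0:Int) ≤ 1)]
  rw [foldl_push]
  have hsp : PySem.Chars.splitOn word.toList "'".toList = splitAp word.toList := by
    have h : "'".toList = ['\''] := by decide
    rw [h, splitOn_eq_splitAp]
  rw [hsp]
  have key := branch_eq_capitalize word.toList
  cases hs : splitAp word.toList with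
  | nil => exact absurd hs (splitAp_ne_nil _)
  | cons p t =>
    rw [hs] at key
    simp only [List.headD_cons, List.drop_succ_cons, List.drop_zero] at key
    simp only [List.map_cons, List.headD_cons, Int.toNat_one, List.drop_succ_cons, List.drop_zero,
      List.singleton_append]
    unfold pyCapitalize PySem.Str.join
    apply congrArg String.ofList
    have h1 : "'".toList = ['\''] := by decide
    rw [h1]
    simp only [List.map_cons, String.toList_ofList, List.map_map]
    have h3 : (String.toList ∘ PySem.Str.lower ∘ String.ofList) = PySem.Chars.lower := by
      funext x; simp [PySem.Str.lower]
    rw [h3]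
    exact key

-- ===== VERDICT (by name: the statement is the Claim_ definition above) =====
theorem proper_title_spec : Claim_equal_proper_title := by
  intro text _
  unfold Spec_proper_title proper_title proper_title_alt
  simp only []
  apply congrArg (PySem.Str.join " ")
  rw [show (fun (result : List String) (word : String) =>
        if PySem.Str.isIn "'" word = true then
          result ++
            [PySem.Str.join "'"
                (List.foldl (fun tp part => tp ++ [PySem.Str.lower part])
                  [pyCapitalize ((List.map String.ofList (PySem.Chars.splitOn word.toList "'".toList)).headD "")]
                  (PySem.List.slice (List.map String.ofList (PySem.Chars.splitOn word.toList "'".toList)) (some 1) none))]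
        else result ++ [pyCapitalize word])
      = (fun (result : List String) (word : String) => result ++
          [if PySem.Str.isIn "'" word = true then
            PySem.Str.join "'"
                (List.foldl (fun tp part => tp ++ [PySem.Str.lower part])
                  [pyCapitalize ((List.map String.ofList (PySem.Chars.splitOn word.toList "'".toList)).headD "")]
                  (PySem.List.slice (List.map String.ofList (PySem.Chars.splitOn word.toList "'".toList)) (some 1) none))
          else pyCapitalize word]) from by
    funext r w; split <;> rfl]
  rw [foldl_push]
  simp only [List.nil_append]
  apply List.map_congr_left
  intro word _
  split
  · exact branch_str word
  · rfl
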